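-- pv_equiv track=rewrite | github.com/E3SM-Project/datasm | esgfpub/scripts/bart_code/archive_map_selector.py | criteria_exclusion
-- ===== SOURCE A (Python) =====
-- am_field = ('Campaign','Model','Experiment','Resolution','Ensemble','DatasetType','ArchivePath','DatasetMatchPattern')
--
-- def criteria_exclusion(pool,crit):
--     #
--     retlist = []
--     for atup in pool:
--         skip = False
--         for acrit in crit:
--             var, val = acrit.split('=')
--             if atup[am_field.index(var)] == val: # need RegExp comparison here
--                 skip = True
--                 break
--         if skip:
--             continue
--         retlist.append(atup)
--
--     return retlist
-- ===== SOURCE B (Python) =====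
-- am_field = ('Campaign','Model','Experiment','Resolution','Ensemble','DatasetType','ArchivePath','DatasetMatchPattern')
--
-- def criteria_exclusion(pool, crit):
--     survivors = list(pool)
--     for acrit in crit:
--         if not survivors:
--             break
--         var, val = acrit.split('=')
--         i = am_field.index(var)
--         survivors = [atup for atup in survivors if atup[i] != val]
--     return survivors
-- ===== Notes on version B (the rewrite author's own statement) =====
-- stated objective: alternative
-- what changed: B inverts the loop nesting: it processes criteria one at a time over a shrinking survivor pool (each criterion split and field-indexed exactly once, breaking when no survivors remain), instead of A's tuple-major scan that re-splits and re-indexes every criterion for every tuple.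
import Mathlib
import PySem

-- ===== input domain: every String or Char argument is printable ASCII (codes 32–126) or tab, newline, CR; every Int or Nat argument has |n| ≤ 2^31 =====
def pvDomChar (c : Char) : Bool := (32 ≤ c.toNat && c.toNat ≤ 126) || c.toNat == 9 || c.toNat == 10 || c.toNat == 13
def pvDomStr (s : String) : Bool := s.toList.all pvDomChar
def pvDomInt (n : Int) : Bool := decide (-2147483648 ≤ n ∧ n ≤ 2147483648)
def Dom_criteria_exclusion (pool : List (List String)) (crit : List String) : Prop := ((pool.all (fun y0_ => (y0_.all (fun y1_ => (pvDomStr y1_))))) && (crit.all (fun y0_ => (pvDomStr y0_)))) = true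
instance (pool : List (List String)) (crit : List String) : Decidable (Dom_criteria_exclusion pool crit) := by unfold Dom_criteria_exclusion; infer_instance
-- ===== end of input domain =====

-- B inverts the loop nesting: criteria are processed one at a time over a shrinking survivor
-- pool (each criterion parsed exactly once, breaking when no survivors remain), instead of
-- A's tuple-major scan that re-splits and re-indexes every criterion for every tuple.

def pvAmField : List String :=
  ["Campaign","Model","Experiment","Resolution","Ensemble","DatasetType","ArchivePath","DatasetMatchPattern"]

-- acrit.split('=') (separator nonempty, so Python's split never raises here)
def pvSplit (acrit : String) : List String := (PySem.Str.split? acrit "=").getD []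

-- ===== PORT A =====
-- inner 'for acrit in crit' loop of A: the 'skip' flag, breaking on the first match;
-- a malformed criterion (not exactly one '=', or unknown field) raises ValueError in Python
-- (outside Pre_); the '| _ => false' arm / '.getD 0' cover those unreachable cases.
def pvSkipA (atup : List String) : List String → Bool
  | [] => false
  | acrit :: rest =>
    match pvSplit acrit with
    | [var, val] =>
      if PySem.List.pyGet? atup (((PySem.List.index? pvAmField var).getD 0 : Nat) : Int) = some val
      then true
      else pvSkipA atup rest
    | _ => false

-- outer 'for atup in pool' loop: append unless skip
def pvLoopA (crit : List String) : List (List String) → List (List String)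
  | [] => []
  | atup :: rest =>
    if pvSkipA atup crit then pvLoopA crit rest else atup :: pvLoopA crit rest

def criteria_exclusion (pool : List (List String)) (crit : List String) : List (List String) :=
  pvLoopA crit pool

-- ===== PORT B =====
-- B's 'for acrit in crit' loop over the shrinking survivor list; 'if not survivors: break';
-- malformed / unknown-field criteria raise in Python (outside Pre_): unreachable arms as in A.
def pvLoopB (survivors : List (List String)) : List String → List (List String)
  | [] => survivors
  | acrit :: rest =>
    if survivors.isEmpty then survivors
    else
      match pvSplit acrit with
      | [var, val] =>
        pvLoopB (survivors.filter (fun atup =>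
          ! decide (PySem.List.pyGet? atup (((PySem.List.index? pvAmField var).getD 0 : Nat) : Int) = some val))) rest
      | _ => survivors

def criteria_exclusion_alt (pool : List (List String)) (crit : List String) : List (List String) :=
  pvLoopB pool crit

-- ===== PRECONDITION & SPEC =====
-- 'atup matches acrit': acrit parses to a known field whose entry in atup equals the value
def pvMatch (atup : List String) (acrit : String) : Bool :=
  match pvSplit acrit with
  | [var, val] =>
    match PySem.List.index? pvAmField var with
    | some i => decide (PySem.List.pyGet? atup ((i : Nat) : Int) = some val)
    | none => false
  | _ => false

-- 'acrit is evaluable on atup without raising': exactly one '=', known field, index in range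
def pvOk (atup : List String) (acrit : String) : Bool :=
  match pvSplit acrit with
  | [var, _] =>
    match PySem.List.index? pvAmField var with
    | some i => decide (i < atup.length)
    | none => false
  | _ => false

-- Pre_ excludes exactly the inputs where Python A raises: some tuple REACHES (matches none of
-- the earlier criteria) a criterion that is malformed, names an unknown field, or indexes past
-- the tuple's length. Criteria never reached (masked by an earlier match for every tuple, or an
-- empty pool) are unconstrained, matching A's and B's lazy evaluation.
def Pre_criteria_exclusion (pool : List (List String)) (crit : List String) : Prop :=
  ∀ atup ∈ pool, ∀ k < crit.length,
    (∀ j < k, pvMatch atup (crit.getD j "") = false) → pvOk atup (crit.getD k "") = true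

instance (pool : List (List String)) (crit : List String) : Decidable (Pre_criteria_exclusion pool crit) := by
  unfold Pre_criteria_exclusion; infer_instance

def pvWitness_criteria_exclusion : List (List String) × List String :=
  ([["c","m","e","r","1","t","p","d"], ["c","x","e","r","2","t","p","d"]], ["Model=x", "Ensemble=3"])

def Spec_criteria_exclusion (pool : List (List String)) (crit : List String) (out : List (List String)) : Prop := out = criteria_exclusion_alt pool crit
instance (pool : List (List String)) (crit : List String) (out : List (List String)) : Decidable (Spec_criteria_exclusion pool crit out) := by unfold Spec_criteria_exclusion; infer_instance

-- ===== CLAIM (what is proved, stated in full; the proofs are below) =====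
def Claim_equal_criteria_exclusion : Prop := ∀ (pool : List (List String)) (crit : List String), Dom_criteria_exclusion pool crit → Pre_criteria_exclusion pool crit → Spec_criteria_exclusion pool crit (criteria_exclusion pool crit)

-- ===== LEMMAS AND PROOFS =====

theorem pvWitness_ok :
    Dom_criteria_exclusion pvWitness_criteria_exclusion.1 pvWitness_criteria_exclusion.2 ∧
    Pre_criteria_exclusion pvWitness_criteria_exclusion.1 pvWitness_criteria_exclusion.2 := by
  decide

-- the per-tuple reachability condition of Pre_, for one tuple
def pvGood (atup : List String) (crit : List String) : Prop :=
  ∀ k < crit.length,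
    (∀ j < k, pvMatch atup (crit.getD j "") = false) → pvOk atup (crit.getD k "") = true

-- shift pvGood across a non-matching head criterion
theorem pvGood_tail (atup : List String) (c : String) (rest : List String)
    (hg : pvGood atup (c :: rest)) (hm : pvMatch atup c = false) : pvGood atup rest := by
  intro k hk hj
  have := hg (k + 1) (by simpa using Nat.succ_lt_succ hk) ?_
  · simpa using this
  · intro j hj'
    cases j with
    | zero => simpa using hm
    | succ j' => simpa using hj j' (Nat.lt_of_succ_lt_succ hj')

-- pvGood gives the head criterion evaluable
theorem pvGood_head (atup : List String) (c : String) (rest : List String)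
    (hg : pvGood atup (c :: rest)) : pvOk atup c = true := by
  have := hg 0 (Nat.succ_pos _) (by intro j hj; omega)
  simpa using this

-- under pvGood, A's inner loop computes 'some criterion matches'
theorem skip_eq_any (atup : List String) (crit : List String)
    (hg : pvGood atup crit) : pvSkipA atup crit = crit.any (pvMatch atup) := by
  induction crit with
  | nil => rfl
  | cons c rest ih =>
    have hok := pvGood_head atup c rest hg
    unfold pvOk at hok
    rcases hsp : pvSplit c with _ | ⟨v, _ | ⟨w, _ | _⟩⟩ <;> rw [hsp] at hok <;> simp at hok
    rw [← PySem.List.index?_eq_idxOf?] at hok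
    rcases hix : PySem.List.index? pvAmField v with _ | i <;> rw [hix] at hok <;> simp at hok
    have hix' : List.idxOf? v pvAmField = some i := by
      rw [← PySem.List.index?_eq_idxOf?]; exact hix
    simp only [pvSkipA, pvMatch, hsp, hix, Option.getD_some, List.any_cons]
    by_cases hm : PySem.List.pyGet? atup ((i : Nat) : Int) = some w
    · simp [hm]
    · simp only [PySem.List.pyGet?_natCast] at hm
      have hrest := ih (pvGood_tail atup c rest hg (by simp [pvMatch, hsp, hix', hm]))
      simp [hm, hrest]

-- A's outer loop is a filter by 'no criterion matches'
theorem loopA_eq_filter (crit : List String) (pool : List (List String))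
    (hg : ∀ atup ∈ pool, pvGood atup crit) :
    pvLoopA crit pool = pool.filter (fun atup => ! crit.any (pvMatch atup)) := by
  induction pool with
  | nil => rfl
  | cons t rest ih =>
    have ht := skip_eq_any t crit (hg t List.mem_cons_self)
    have hrest := ih (fun a ha => hg a (List.mem_cons_of_mem _ ha))
    by_cases hs : pvSkipA t crit = true <;>
      simp [pvLoopA, hs, hrest, ← ht]

-- B's shrinking-pool loop computes the same filter
theorem loopB_eq_filter (crit : List String) (pool : List (List String))
    (hg : ∀ atup ∈ pool, pvGood atup crit) :
    pvLoopB pool crit = pool.filter (fun atup => ! crit.any (pvMatch atup)) := by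
  induction crit generalizing pool with
  | nil => simp [pvLoopB]
  | cons c rest ih =>
    by_cases hne : pool.isEmpty
    · rw [List.isEmpty_iff] at hne
      subst hne; simp [pvLoopB]
    · obtain ⟨t0, ht0⟩ := List.isEmpty_eq_false_iff_exists_mem.mp (by simpa using hne)
      have hok := pvGood_head t0 c rest (hg t0 ht0)
      unfold pvOk at hok
      rcases hsp : pvSplit c with _ | ⟨v, _ | ⟨w, _ | _⟩⟩ <;> rw [hsp] at hok <;> simp at hok
      rw [← PySem.List.index?_eq_idxOf?] at hok
      rcases hix : PySem.List.index? pvAmField v with _ | i <;> rw [hix] at hok <;> simp at hok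
      have hix' : List.idxOf? v pvAmField = some i := by
        rw [← PySem.List.index?_eq_idxOf?]; exact hix
      have hpred : ∀ atup : List String,
          (! decide (PySem.List.pyGet? atup (((PySem.List.index? pvAmField v).getD 0 : Nat) : Int) = some w))
            = ! pvMatch atup c := by
        intro atup; simp [pvMatch, hsp, hix']
      simp only [pvLoopB, hsp]
      rw [if_neg (by simp [hne])]
      rw [List.filter_congr (fun a _ => hpred a)]
      rw [ih (pool.filter (fun atup => ! pvMatch atup c)) ?_]
      · rw [List.filter_filter]
        refine List.filter_congr ?_
        intro a _
        simp [Bool.and_comm]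
      · intro a ha
        rw [List.mem_filter] at ha
        exact pvGood_tail a c rest (hg a ha.1) (by simpa using ha.2)

-- ===== VERDICT (by name: the statement is the Claim_ definition above) =====
theorem criteria_exclusion_spec : Claim_equal_criteria_exclusion := by
  intro pool crit _hdom hpre
  unfold Spec_criteria_exclusion criteria_exclusion criteria_exclusion_alt
  have hg : ∀ atup ∈ pool, pvGood atup crit := fun a ha => hpre a ha
  rw [loopA_eq_filter crit pool hg, loopB_eq_filter crit pool hg]
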